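-- pv_equiv track=rewrite | github.com/antonioam82/CG-Interactive-Codes | collision_detection_demo2.py | calculate_aabb
-- ===== SOURCE A (Python) =====
-- def calculate_aabb(vertices, position):
--     min_x = min([vertex[0] + position[0] for vertex in vertices])
--     max_x = max([vertex[0] + position[0] for vertex in vertices])
--     min_y = min([vertex[1] + position[1] for vertex in vertices])
--     max_y = max([vertex[1] + position[1] for vertex in vertices])
--     min_z = min([vertex[2] + position[2] for vertex in vertices])
--     max_z = max([vertex[2] + position[2] for vertex in vertices])
--     return min_x, max_x, min_y, max_y, min_z, max_z
-- ===== SOURCE B (Python) =====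
-- def calculate_aabb(vertices, position):
--     if not vertices:
--         raise ValueError("min() arg is an empty sequence")
--     px, py, pz = position[0], position[1], position[2]
--     v0 = vertices[0]
--     min_x = max_x = v0[0] + px
--     min_y = max_y = v0[1] + py
--     min_z = max_z = v0[2] + pz
--     for v in vertices[1:]:
--         x, y, z = v[0] + px, v[1] + py, v[2] + pz
--         if x < min_x: min_x = x
--         if x > max_x: max_x = x
--         if y < min_y: min_y = y
--         if y > max_y: max_y = y
--         if z < min_z: min_z = z
--         if z > max_z: max_z = z
--     return min_x, max_x, min_y, max_y, min_z, max_z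
-- ===== Notes on version B (the rewrite author's own statement) =====
-- stated objective: simpler
-- what changed: Replaces six separate list-comprehension passes (each building a list then calling min/max) with one single loop over the vertices that maintains six running min/max accumulators seeded from the first vertex.
import Mathlib
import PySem

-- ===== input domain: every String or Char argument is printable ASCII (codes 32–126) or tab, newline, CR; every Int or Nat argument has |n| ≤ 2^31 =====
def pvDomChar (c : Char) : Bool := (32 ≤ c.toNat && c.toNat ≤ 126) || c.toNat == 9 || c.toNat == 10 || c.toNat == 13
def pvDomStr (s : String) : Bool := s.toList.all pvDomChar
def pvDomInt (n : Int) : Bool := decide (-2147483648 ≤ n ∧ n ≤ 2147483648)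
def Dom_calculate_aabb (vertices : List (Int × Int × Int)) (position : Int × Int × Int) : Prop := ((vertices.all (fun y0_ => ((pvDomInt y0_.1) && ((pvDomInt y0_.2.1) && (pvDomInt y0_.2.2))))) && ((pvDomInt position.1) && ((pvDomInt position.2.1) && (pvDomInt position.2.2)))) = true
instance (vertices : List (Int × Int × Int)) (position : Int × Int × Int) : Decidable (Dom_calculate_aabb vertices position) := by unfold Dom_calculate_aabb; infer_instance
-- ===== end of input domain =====

-- B replaces A's six separate min/max passes over comprehension lists with one
-- loop maintaining six running accumulators seeded from the first vertex.

-- ===== PORT A =====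
-- six comprehensions, each reduced by min()/max(); empty vertices raise (min? = none, excluded by Pre_)
def calculate_aabb (vertices : List (Int × Int × Int)) (position : Int × Int × Int) : Int × Int × Int × Int × Int × Int :=
  let min_x := (PySem.List.min? (vertices.map (fun v => v.1 + position.1)) (fun x => x)).getD 0
  let max_x := (PySem.List.max? (vertices.map (fun v => v.1 + position.1)) (fun x => x)).getD 0
  let min_y := (PySem.List.min? (vertices.map (fun v => v.2.1 + position.2.1)) (fun x => x)).getD 0
  let max_y := (PySem.List.max? (vertices.map (fun v => v.2.1 + position.2.1)) (fun x => x)).getD 0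
  let min_z := (PySem.List.min? (vertices.map (fun v => v.2.2 + position.2.2)) (fun x => x)).getD 0
  let max_z := (PySem.List.max? (vertices.map (fun v => v.2.2 + position.2.2)) (fun x => x)).getD 0
  (min_x, max_x, min_y, max_y, min_z, max_z)

-- ===== PORT B =====
def aabbStep (position : Int × Int × Int) (acc : Int × Int × Int × Int × Int × Int)
    (v : Int × Int × Int) : Int × Int × Int × Int × Int × Int :=
  let x := v.1 + position.1
  let y := v.2.1 + position.2.1
  let z := v.2.2 + position.2.2
  (if x < acc.1 then x else acc.1,
   if x > acc.2.1 then x else acc.2.1,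
   if y < acc.2.2.1 then y else acc.2.2.1,
   if y > acc.2.2.2.1 then y else acc.2.2.2.1,
   if z < acc.2.2.2.2.1 then z else acc.2.2.2.2.1,
   if z > acc.2.2.2.2.2 then z else acc.2.2.2.2.2)

def calculate_aabb_alt (vertices : List (Int × Int × Int)) (position : Int × Int × Int) : Int × Int × Int × Int × Int × Int :=
  match vertices with
  | [] => (0, 0, 0, 0, 0, 0)   -- B raises ValueError here (outside Pre_)
  | v0 :: rest =>
    let x0 := v0.1 + position.1
    let y0 := v0.2.1 + position.2.1
    let z0 := v0.2.2 + position.2.2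
    rest.foldl (aabbStep position) (x0, x0, y0, y0, z0, z0)

-- ===== PRECONDITION & SPEC =====
-- Pre_ excludes the empty vertex list, on which A raises ValueError (min of an empty sequence); B raises ValueError there too.
def Pre_calculate_aabb (vertices : List (Int × Int × Int)) (position : Int × Int × Int) : Prop := vertices ≠ []
instance (vertices : List (Int × Int × Int)) (position : Int × Int × Int) : Decidable (Pre_calculate_aabb vertices position) := by unfold Pre_calculate_aabb; infer_instance
def pvWitness_calculate_aabb : (List (Int × Int × Int)) × (Int × Int × Int) := ([(1, 2, 3), (-4, 5, 0)], (10, -1, 2))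

def Spec_calculate_aabb (vertices : List (Int × Int × Int)) (position : Int × Int × Int) (out : Int × Int × Int × Int × Int × Int) : Prop := out = calculate_aabb_alt vertices position
instance (vertices : List (Int × Int × Int)) (position : Int × Int × Int) (out : Int × Int × Int × Int × Int × Int) : Decidable (Spec_calculate_aabb vertices position out) := by unfold Spec_calculate_aabb; infer_instance

-- ===== CLAIM (what is proved, stated in full; the proofs are below) =====
def Claim_equal_calculate_aabb : Prop := ∀ (vertices : List (Int × Int × Int)) (position : Int × Int × Int), Dom_calculate_aabb vertices position → Pre_calculate_aabb vertices position → Spec_calculate_aabb vertices position (calculate_aabb vertices position)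

-- ===== LEMMAS AND PROOFS =====

-- B's fold over the six-tuple splits into six independent min/max folds.
theorem aabb_fold_split (position : Int × Int × Int) (rest : List (Int × Int × Int))
    (a b c d e f : Int) :
    rest.foldl (aabbStep position) (a, b, c, d, e, f) =
      (rest.foldl (fun m v => min m (v.1 + position.1)) a,
       rest.foldl (fun m v => max m (v.1 + position.1)) b,
       rest.foldl (fun m v => min m (v.2.1 + position.2.1)) c,
       rest.foldl (fun m v => max m (v.2.1 + position.2.1)) d,
       rest.foldl (fun m v => min m (v.2.2 + position.2.2)) e,
       rest.foldl (fun m v => max m (v.2.2 + position.2.2)) f) := by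
  induction rest generalizing a b c d e f with
  | nil => rfl
  | cons v t ih =>
    have hmin : ∀ x a : Int, (if x < a then x else a) = min a x := by
      intro x a; simp [Int.min_def]; omega
    have hmax : ∀ x a : Int, (if x > a then x else a) = max a x := by
      intro x a; simp [Int.max_def]; omega
    simp only [List.foldl_cons, aabbStep, hmin, hmax, ih]

theorem calculate_aabb_spec : Claim_equal_calculate_aabb := by
  intro vertices position _ hpre
  unfold Spec_calculate_aabb
  match vertices with
  | [] => exact absurd rfl hpre
  | v0 :: rest =>
    simp only [calculate_aabb, calculate_aabb_alt, List.map_cons,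
      PySem.List.min?_id_cons, PySem.List.max?_id_cons, Option.getD_some,
      aabb_fold_split, List.foldl_map]
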